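-- pv_equiv track=rewrite | github.com/ahmadelsallab/StockMarketPredictionWebsite | twitter_search_1.3.py | getMaxMinId
-- ===== SOURCE A (Python) =====
-- def getMaxMinId(results):
--     minId = results[0]['id'];
--     maxId = results[0]['id'];
--     for result in results:
--         if(result['id'] > maxId):
--             maxId = result['id']
--         if(result['id'] < minId):
--             minId = result['id']
--     return maxId, minId
-- ===== SOURCE B (Python) =====
-- def getMaxMinId(results):
--     ids = [result['id'] for result in results]
--     return max(ids), min(ids)
-- ===== Notes on version B (the rewrite author's own statement) =====
-- stated objective: idiomatic
-- what changed: Replaced A's single hand-rolled running-max/min loop with an extract-the-ids comprehension followed by the builtin max and min reductions.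
import Mathlib
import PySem

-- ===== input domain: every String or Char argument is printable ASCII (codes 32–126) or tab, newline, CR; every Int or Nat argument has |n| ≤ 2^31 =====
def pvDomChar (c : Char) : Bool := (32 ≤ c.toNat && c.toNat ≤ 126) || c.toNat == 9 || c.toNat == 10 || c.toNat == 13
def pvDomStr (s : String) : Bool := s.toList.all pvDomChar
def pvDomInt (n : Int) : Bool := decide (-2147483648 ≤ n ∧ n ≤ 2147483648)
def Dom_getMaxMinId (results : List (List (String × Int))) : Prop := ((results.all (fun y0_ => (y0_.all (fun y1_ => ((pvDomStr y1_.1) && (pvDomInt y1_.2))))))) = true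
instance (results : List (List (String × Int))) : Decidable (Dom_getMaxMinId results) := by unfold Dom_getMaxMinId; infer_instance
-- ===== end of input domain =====

-- B replaces A's single combined running-max/min loop by an ids-extraction map
-- followed by the builtin max/min reductions (idiomatic decomposition; same cost).


-- ===== PORT A =====
-- result['id'] ; on Pre_ the key is always present (KeyError/IndexError excluded by Pre_)
def pvIdOfA (r : List (String × Int)) : Int := ((PySem.Dict.mk r).get? "id").getD 0

def getMaxMinId (results : List (List (String × Int))) : Int × Int :=
  let minId : Int := pvIdOfA ((PySem.List.pyGet? results 0).getD [])
  let maxId : Int := minId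
  let p := results.foldl
    (fun (p : Int × Int) r =>
      (if pvIdOfA r > p.1 then pvIdOfA r else p.1,
       if pvIdOfA r < p.2 then pvIdOfA r else p.2))
    (maxId, minId)
  p

-- ===== PORT B =====
def pvIdOfB (result : List (String × Int)) : Int := ((PySem.Dict.mk result).get? "id").getD 0

def getMaxMinId_alt (results : List (List (String × Int))) : Int × Int :=
  let ids := results.map pvIdOfB
  ((PySem.List.max? ids (fun x => x)).getD 0, (PySem.List.min? ids (fun x => x)).getD 0)

-- ===== PRECONDITION & SPEC =====
-- Pre_ excludes the empty list (A raises IndexError, B ValueError) and rows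
-- lacking an 'id' key (both raise KeyError).
def Pre_getMaxMinId (results : List (List (String × Int))) : Prop :=
  results ≠ [] ∧ ∀ r ∈ results, ((PySem.Dict.mk r).get? "id").isSome = true
instance (results : List (List (String × Int))) : Decidable (Pre_getMaxMinId results) := by unfold Pre_getMaxMinId; infer_instance
def pvWitness_getMaxMinId : (List (List (String × Int))) := [[("id", 3)], [("id", -1)]]

def Spec_getMaxMinId (results : List (List (String × Int))) (out : Int × Int) : Prop := out = getMaxMinId_alt results
instance (results : List (List (String × Int))) (out : Int × Int) : Decidable (Spec_getMaxMinId results out) := by unfold Spec_getMaxMinId; infer_instance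

-- ===== CLAIM (what is proved, stated in full; the proofs are below) =====
def Claim_equal_getMaxMinId : Prop := ∀ (results : List (List (String × Int))), Dom_getMaxMinId results → Pre_getMaxMinId results → Spec_getMaxMinId results (getMaxMinId results)

-- ===== LEMMAS AND PROOFS =====

theorem pvIdOfA_eq_B : pvIdOfA = pvIdOfB := rfl

theorem fold_split (ids : List Int) (a b : Int) :
    ids.foldl (fun (p : Int × Int) x =>
        (if x > p.1 then x else p.1, if x < p.2 then x else p.2)) (a, b)
      = (ids.foldl max a, ids.foldl min b) := by
  induction ids generalizing a b with
  | nil => rfl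
  | cons x t ih =>
      simp only [List.foldl_cons, ih]
      congr 1 <;> [skip; skip] <;> congr 1 <;> omega

theorem getMaxMinId_spec : Claim_equal_getMaxMinId := by
  intro results _ hpre
  obtain ⟨hne, _⟩ := hpre
  obtain ⟨r0, rest, rfl⟩ := List.exists_cons_of_ne_nil hne
  unfold Spec_getMaxMinId getMaxMinId getMaxMinId_alt
  simp only [List.map_cons, PySem.List.max?_id_cons, PySem.List.min?_id_cons,
    Option.getD_some]
  have hfold :
      ((r0 :: rest).foldl (fun (p : Int × Int) r =>
          (if pvIdOfA r > p.1 then pvIdOfA r else p.1,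
           if pvIdOfA r < p.2 then pvIdOfA r else p.2))
        (pvIdOfA r0, pvIdOfA r0))
      = (((r0 :: rest).map pvIdOfA).foldl
            (fun (p : Int × Int) x =>
              (if x > p.1 then x else p.1, if x < p.2 then x else p.2))
            (pvIdOfA r0, pvIdOfA r0)) := by
    rw [List.foldl_map]
  have h0 : pvIdOfA ((PySem.List.pyGet? (r0 :: rest) 0).getD []) = pvIdOfA r0 := by
    simp [PySem.List.pyGet?, PySem.List.pyIdx?]
  simp only [h0, hfold, fold_split, List.map_cons, List.foldl_cons]
  rw [pvIdOfA_eq_B]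
  simp

-- ===== VERDICT (by name: the statement is the Claim_ definition above) =====
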